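-- pv_equiv track=rewrite | github.com/sobitxanovr/CSc-110 | infographic.py | capitalization_punctuation
-- ===== SOURCE A (Python) =====
-- def capitalization_punctuation(dict_count):
--     """
--     the function determines how many capitalized, non-capitalized, punctuated, and non-punctuated
--     words there are in a given dictionary of words
--     :param dict_count: a dictionary - keys and values of which are unique words and their counts
--     :return: two lists - the firs contains punctuated and non-punctuated words, and the other
--     contains capitalized and non-capitalized words
--     """
--     capitalized = 0
--     non_capitalized = 0
--     punctuated = 0
--     non_punctuated = 0
--     # calculating the number of cap/non-cap and punc/non-punc words
--     for word, count in dict_count.items():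
--         if word[0].isupper():
--             capitalized += count
--         else:
--             non_capitalized += count
--         if word[-1] == ',' or word[-1] == '.' or word[-1] == '!' or word[-1] == '?':
--             punctuated += count
--         else:
--             non_punctuated += count
--     punctuation = [punctuated, non_punctuated]
--     capitalization = [capitalized, non_capitalized]
--     return capitalization, punctuation
-- ===== SOURCE B (Python) =====
-- def capitalization_punctuation(dict_count):
--     """Divide-and-conquer: recursively split the item list in half, compute the
--     4-vector (cap, non_cap, punc, non_punc) for each half and add componentwise."""
--     items = list(dict_count.items())
--
--     def solve(lo, hi):
--         if hi == lo:
--             return (0, 0, 0, 0)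
--         if hi - lo == 1:
--             w, c = items[lo]
--             cap = c if w[0].isupper() else 0
--             punc = c if w[-1] in ',.!?' else 0
--             return (cap, c - cap, punc, c - punc)
--         mid = (lo + hi) // 2
--         l = solve(lo, mid)
--         r = solve(mid, hi)
--         return (l[0] + r[0], l[1] + r[1], l[2] + r[2], l[3] + r[3])
--
--     cap, non_cap, punc, non_punc = solve(0, len(items))
--     return [cap, non_cap], [punc, non_punc]
-- ===== Notes on version B (the rewrite author's own statement) =====
-- stated objective: alternative
-- what changed: B replaces A's single left-to-right loop with four running accumulators by a recursive divide-and-conquer that splits the item list in half, computes a (cap, non-cap, punc, non-punc) 4-vector per half at the leaves, and merges halves by componentwise vector addition (correct because all four counts are sums, hence associative/commutative over any split).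
import Mathlib
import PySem

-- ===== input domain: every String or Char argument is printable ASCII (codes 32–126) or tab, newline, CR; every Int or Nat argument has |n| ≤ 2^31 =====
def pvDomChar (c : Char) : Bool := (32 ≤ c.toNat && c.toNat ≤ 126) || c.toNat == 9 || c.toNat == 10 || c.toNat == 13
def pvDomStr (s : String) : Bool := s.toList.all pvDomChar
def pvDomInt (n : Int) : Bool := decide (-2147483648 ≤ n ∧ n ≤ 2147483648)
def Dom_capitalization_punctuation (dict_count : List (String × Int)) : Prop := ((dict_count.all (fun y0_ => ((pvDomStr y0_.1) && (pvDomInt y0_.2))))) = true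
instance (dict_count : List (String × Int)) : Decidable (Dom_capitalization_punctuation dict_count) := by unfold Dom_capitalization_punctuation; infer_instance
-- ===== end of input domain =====

-- B replaces A's single accumulating loop by a recursive divide-and-conquer over the item list
-- (halve, solve each half as a 4-vector, add componentwise) — alternative decomposition, same cost.


-- ===== PORT A =====
-- word[0].isupper()  (exact under Pre_: every key nonempty, so pyGetD's default is never used)
def pvIsCap (w : String) : Bool := PySem.Chars.isupper (PySem.List.pyGetD w.toList 0 ' ')
-- word[-1] == ',' or word[-1] == '.' or word[-1] == '!' or word[-1] == '?'
def pvIsPunc (w : String) : Bool :=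
  let c := PySem.List.pyGetD w.toList (-1) ' '
  c == ',' || c == '.' || c == '!' || c == '?'

def capitalization_punctuation (dict_count : List (String × Int)) : List Int × List Int :=
  let st := dict_count.foldl
    (fun (st : Int × Int × Int × Int) wc =>
      let (capitalized, non_capitalized, punctuated, non_punctuated) := st
      let (capitalized, non_capitalized) :=
        if pvIsCap wc.1 then (capitalized + wc.2, non_capitalized)
        else (capitalized, non_capitalized + wc.2)
      let (punctuated, non_punctuated) :=
        if pvIsPunc wc.1 then (punctuated + wc.2, non_punctuated)
        else (punctuated, non_punctuated + wc.2)
      (capitalized, non_capitalized, punctuated, non_punctuated))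
    (0, 0, 0, 0)
  ([st.1, st.2.1], [st.2.2.1, st.2.2.2])

-- ===== PORT B =====
-- solve(lo, hi) of Source B: divide-and-conquer on the index range over the fixed item list
def pvSolve (items : List (String × Int)) (lo hi : Nat) : Int × Int × Int × Int :=
  if hi ≤ lo then (0, 0, 0, 0)  -- totality guard; Python's `hi == lo` (lo ≤ hi always holds)
  else if hi - lo = 1 then
    let wc := PySem.List.pyGetD items (lo : Int) ("", 0)
    let cap := if pvIsCap wc.1 then wc.2 else 0
    let punc := if pvIsPunc wc.1 then wc.2 else 0
    (cap, wc.2 - cap, punc, wc.2 - punc)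
  else
    let mid := (lo + hi) / 2
    let l := pvSolve items lo mid
    let r := pvSolve items mid hi
    (l.1 + r.1, l.2.1 + r.2.1, l.2.2.1 + r.2.2.1, l.2.2.2 + r.2.2.2)
termination_by hi - lo
decreasing_by all_goals omega

def capitalization_punctuation_alt (dict_count : List (String × Int)) : List Int × List Int :=
  let st := pvSolve dict_count 0 dict_count.length
  ([st.1, st.2.1], [st.2.2.1, st.2.2.2])

-- ===== PRECONDITION & SPEC =====
-- Pre_ excludes dictionaries with an empty-string key, on which the Python A raises IndexError (word[0]).
def Pre_capitalization_punctuation (dict_count : List (String × Int)) : Prop :=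
  ∀ p ∈ dict_count, p.1 ≠ ""
instance (dict_count : List (String × Int)) : Decidable (Pre_capitalization_punctuation dict_count) := by unfold Pre_capitalization_punctuation; infer_instance
def pvWitness_capitalization_punctuation : (List (String × Int)) := [("Hi.", 2), ("yes", 1)]

def Spec_capitalization_punctuation (dict_count : List (String × Int)) (out : List Int × List Int) : Prop := out = capitalization_punctuation_alt dict_count
instance (dict_count : List (String × Int)) (out : List Int × List Int) : Decidable (Spec_capitalization_punctuation dict_count out) := by unfold Spec_capitalization_punctuation; infer_instance

-- ===== CLAIM (what is proved, stated in full; the proofs are below) =====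
def Claim_equal_capitalization_punctuation : Prop := ∀ (dict_count : List (String × Int)), Dom_capitalization_punctuation dict_count → Pre_capitalization_punctuation dict_count → Spec_capitalization_punctuation dict_count (capitalization_punctuation dict_count)

-- ===== LEMMAS AND PROOFS =====
-- the three sums both programs compute, as reference values
def pvCapS (l : List (String × Int)) : Int := ((l.filter (fun wc => pvIsCap wc.1)).map Prod.snd).sum
def pvPuncS (l : List (String × Int)) : Int := ((l.filter (fun wc => pvIsPunc wc.1)).map Prod.snd).sum
def pvTotS (l : List (String × Int)) : Int := (l.map Prod.snd).sum

theorem pvCapS_append (a b : List (String × Int)) : pvCapS (a ++ b) = pvCapS a + pvCapS b := by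
  simp [pvCapS]
theorem pvPuncS_append (a b : List (String × Int)) : pvPuncS (a ++ b) = pvPuncS a + pvPuncS b := by
  simp [pvPuncS]
theorem pvTotS_append (a b : List (String × Int)) : pvTotS (a ++ b) = pvTotS a + pvTotS b := by
  simp [pvTotS]

-- B's divide-and-conquer computes the sums over the slice items[lo:hi]
theorem pvSolve_eq (n : Nat) (items : List (String × Int)) (lo hi : Nat)
    (hn : hi - lo = n) (hlh : lo ≤ hi) (hh : hi ≤ items.length) :
    pvSolve items lo hi =
      (pvCapS ((items.drop lo).take (hi - lo)),
       pvTotS ((items.drop lo).take (hi - lo)) - pvCapS ((items.drop lo).take (hi - lo)),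
       pvPuncS ((items.drop lo).take (hi - lo)),
       pvTotS ((items.drop lo).take (hi - lo)) - pvPuncS ((items.drop lo).take (hi - lo))) := by
  induction n using Nat.strong_induction_on generalizing lo hi with
  | _ n ih =>
  unfold pvSolve
  by_cases h0 : hi ≤ lo
  · have : hi = lo := by omega
    subst this
    simp [pvCapS, pvPuncS, pvTotS]
  · by_cases h1 : hi - lo = 1
    · have hlt : lo < items.length := by omega
      have hs : (items.drop lo).take (hi - lo) = [items[lo]] := by
        rw [h1]; exact List.take_one_drop_eq_of_lt_length hlt
      have hg : PySem.List.pyGetD items (lo : Int) ("", 0) = items[lo] := by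
        rw [PySem.List.pyGetD_natCast, List.getD_eq_getElem _ _ hlt]
      rw [if_neg h0, if_pos h1]
      simp only [hg, hs, pvCapS, pvPuncS, pvTotS]
      by_cases hc : pvIsCap items[lo].1 <;> by_cases hp : pvIsPunc items[lo].1 <;>
        simp [hc, hp]
    · simp only [h0, h1, if_false]
      have hmid1 : lo < (lo + hi) / 2 := by omega
      have hmid2 : (lo + hi) / 2 < hi := by omega
      rw [ih ((lo + hi) / 2 - lo) (by omega) lo ((lo + hi) / 2) rfl (by omega) (by omega),
          ih (hi - (lo + hi) / 2) (by omega) ((lo + hi) / 2) hi rfl (by omega) (by omega)]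
      have hsplit : (items.drop lo).take (hi - lo) =
          (items.drop lo).take ((lo + hi) / 2 - lo) ++ (items.drop ((lo + hi) / 2)).take (hi - (lo + hi) / 2) := by
        have h2 : items.drop ((lo + hi) / 2) = (items.drop lo).drop ((lo + hi) / 2 - lo) := by
          rw [List.drop_drop]; congr 1; omega
        rw [h2, ← List.take_add]
        congr 1; omega
      rw [hsplit, pvCapS_append, pvPuncS_append, pvTotS_append]
      simp only [Prod.mk.injEq]
      refine ⟨?_, ?_, ?_, ?_⟩ <;> first | trivial | omega

-- A's fold, starting from any accumulators, adds the three sums componentwise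
theorem pvFold_eq (l : List (String × Int)) (a b c d : Int) :
    l.foldl
      (fun (st : Int × Int × Int × Int) wc =>
        let (capitalized, non_capitalized, punctuated, non_punctuated) := st
        let (capitalized, non_capitalized) :=
          if pvIsCap wc.1 then (capitalized + wc.2, non_capitalized)
          else (capitalized, non_capitalized + wc.2)
        let (punctuated, non_punctuated) :=
          if pvIsPunc wc.1 then (punctuated + wc.2, non_punctuated)
          else (punctuated, non_punctuated + wc.2)
        (capitalized, non_capitalized, punctuated, non_punctuated))
      (a, b, c, d) =
    (a + pvCapS l, b + (pvTotS l - pvCapS l), c + pvPuncS l, d + (pvTotS l - pvPuncS l)) := by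
  induction l generalizing a b c d with
  | nil => simp [pvCapS, pvPuncS, pvTotS]
  | cons wc t ih =>
    by_cases hc : pvIsCap wc.1 <;> by_cases hp : pvIsPunc wc.1 <;>
      simp [List.foldl_cons, hc, hp, ih, pvCapS, pvPuncS, pvTotS, Prod.ext_iff] <;> omega

-- ===== VERDICT (by name: the statement is the Claim_ definition above) =====
theorem capitalization_punctuation_spec : Claim_equal_capitalization_punctuation := by
  intro dc _ _
  unfold Spec_capitalization_punctuation capitalization_punctuation capitalization_punctuation_alt
  rw [pvFold_eq, pvSolve_eq (dc.length - 0) dc 0 dc.length rfl (Nat.zero_le _) le_rfl]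
  simp
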